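-- pv_equiv track=rewrite | github.com/pnnl/FragNet | build/lib/fragnet/dataset/data.py | get_bond_pair_fbond_graph
-- ===== SOURCE A (Python) =====
-- def get_bond_pair_fbond_graph(idx_bond_index):
--
--     nnodes = len(idx_bond_index)
--     res = [[],[]]
--
--     if (nnodes==2):
--         for i in range(nnodes):
--             b1 = idx_bond_index[i]
--             for j in range(nnodes):
--                 b2 = idx_bond_index[j]
--                 if b1 != b2:
--                     res[0] += [i]
--                     res[1] += [j]
--
--     else:
--         for i in range(nnodes):
--             b1 = idx_bond_index[i]
--             for j in range(nnodes):
--                 b2 = idx_bond_index[j]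
--                 if len(list(set(b1).intersection(b2))) ==1 :
--                     res[0] += [i]
--                     res[1] += [j]
--
--     return res
-- ===== SOURCE B (Python) =====
-- def get_bond_pair_fbond_graph(idx_bond_index):
--     n = len(idx_bond_index)
--     if n == 2:
--         if idx_bond_index[0] != idx_bond_index[1]:
--             return [[0, 1], [1, 0]]
--         return [[], []]
--     sets = [set(b) for b in idx_bond_index]
--     atom_to_bonds = {}
--     for i, s in enumerate(sets):
--         for a in s:
--             atom_to_bonds.setdefault(a, []).append(i)
--     src, dst = [], []
--     for i, s in enumerate(sets):
--         cand = set()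
--         for a in s:
--             cand.update(atom_to_bonds[a])
--         js = sorted(j for j in cand if len(s & sets[j]) == 1)
--         src += [i] * len(js)
--         dst += js
--     return [src, dst]
-- ===== Notes on version B (the rewrite author's own statement) =====
-- stated objective: faster
-- what changed: B replaces A's all-pairs double loop by an inverted atom-to-bond-indices dictionary: for each bond only bonds sharing an atom are gathered, filtered by intersection size == 1 and sorted per row (the 2-bond special case is returned in closed form).
import Mathlib
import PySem

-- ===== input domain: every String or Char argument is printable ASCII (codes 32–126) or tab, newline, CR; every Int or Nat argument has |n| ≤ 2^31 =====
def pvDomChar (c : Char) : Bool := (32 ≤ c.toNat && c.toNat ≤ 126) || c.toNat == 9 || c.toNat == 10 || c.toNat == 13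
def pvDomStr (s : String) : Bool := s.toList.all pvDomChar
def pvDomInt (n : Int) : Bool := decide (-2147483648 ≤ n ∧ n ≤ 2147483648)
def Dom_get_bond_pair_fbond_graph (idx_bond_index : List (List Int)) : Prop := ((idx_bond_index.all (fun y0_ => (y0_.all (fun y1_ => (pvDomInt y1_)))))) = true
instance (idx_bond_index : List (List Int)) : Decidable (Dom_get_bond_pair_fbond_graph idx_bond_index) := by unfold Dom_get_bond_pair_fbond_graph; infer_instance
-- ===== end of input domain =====

-- B replaces A's all-pairs O(n^2) scan by an atom→bonds index: only bonds sharing an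
-- atom are examined, their indices filtered by |intersection| == 1 and sorted per row.

-- ===== PORT A =====
def get_bond_pair_fbond_graph (idx_bond_index : List (List Int)) : List (List Int) :=
  let nnodes : Int := PySem.List.len idx_bond_index
  let res : List Int × List Int :=
    if nnodes == 2 then
      (PySem.List.pyRange 0 nnodes 1).foldl (fun r i =>
        let b1 := PySem.List.pyGetD idx_bond_index i []
        (PySem.List.pyRange 0 nnodes 1).foldl (fun r j =>
          let b2 := PySem.List.pyGetD idx_bond_index j []
          if b1 ≠ b2 then (r.1 ++ [i], r.2 ++ [j]) else r) r) ([], [])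
    else
      (PySem.List.pyRange 0 nnodes 1).foldl (fun r i =>
        let b1 := PySem.List.pyGetD idx_bond_index i []
        (PySem.List.pyRange 0 nnodes 1).foldl (fun r j =>
          let b2 := PySem.List.pyGetD idx_bond_index j []
          if (PySem.Set.inter (PySem.Set.ofList b1) b2).len == 1 then
            (r.1 ++ [i], r.2 ++ [j])
          else r) r) ([], [])
  [res.1, res.2]

-- ===== PORT B =====
-- atom_to_bonds.setdefault(a, []).append(i) for each atom a of bond set s
def fbAddBond (d : PySem.Dict Int (List Int)) (i : Int) (s : List Int) :
    PySem.Dict Int (List Int) :=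
  s.foldl (fun d a => d.modify a [] (fun l => l ++ [i])) d

-- the atom → list-of-bond-indices dictionary
def fbAtomIndex (sets : List (List Int)) : PySem.Dict Int (List Int) :=
  (PySem.List.enumerate sets).foldl (fun d p => fbAddBond d p.1 p.2) PySem.Dict.empty

-- cand = union of the buckets of s's atoms
def fbCand (a2b : PySem.Dict Int (List Int)) (s : List Int) : PySem.Set Int :=
  s.foldl (fun c a => PySem.Set.update c (a2b.getD a [])) PySem.Set.empty

def get_bond_pair_fbond_graph_alt (idx_bond_index : List (List Int)) : List (List Int) :=
  let n : Int := PySem.List.len idx_bond_index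
  if n == 2 then
    if PySem.List.pyGetD idx_bond_index 0 [] ≠ PySem.List.pyGetD idx_bond_index 1 [] then
      [[0, 1], [1, 0]]
    else [[], []]
  else
    let sets := idx_bond_index.map (fun b => PySem.Set.ofList b)
    let a2b := fbAtomIndex sets
    let res : List Int × List Int :=
      (PySem.List.enumerate sets).foldl (fun r p =>
        let js := PySem.List.sorted
          (List.filter (fun j => (PySem.Set.inter p.2 (PySem.List.pyGetD sets j [])).len == 1)
            (fbCand a2b p.2)) (fun x => x) false
        (r.1 ++ List.replicate js.length p.1, r.2 ++ js)) ([], [])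
    [res.1, res.2]

-- ===== PRECONDITION & SPEC =====
def Spec_get_bond_pair_fbond_graph (idx_bond_index : List (List Int)) (out : List (List Int)) : Prop := out = get_bond_pair_fbond_graph_alt idx_bond_index
instance (idx_bond_index : List (List Int)) (out : List (List Int)) : Decidable (Spec_get_bond_pair_fbond_graph idx_bond_index out) := by unfold Spec_get_bond_pair_fbond_graph; infer_instance

-- ===== CLAIM (what is proved, stated in full; the proofs are below) =====
def Claim_equal_get_bond_pair_fbond_graph : Prop := ∀ (idx_bond_index : List (List Int)), Dom_get_bond_pair_fbond_graph idx_bond_index → Spec_get_bond_pair_fbond_graph idx_bond_index (get_bond_pair_fbond_graph idx_bond_index)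

-- ===== LEMMAS AND PROOFS =====

-- the shared per-row predicate: |set(b1) ∩ set(b2)| == 1, phrased on sets
def pvQ (sets : List (List Int)) (s : List Int) (j : Int) : Bool :=
  (PySem.Set.inter s (PySem.List.pyGetD sets j [])).len == 1

lemma pv_inter_ofList (s b : List Int) :
    PySem.Set.inter s (PySem.Set.ofList b) = PySem.Set.inter s b := by
  unfold PySem.Set.inter
  apply List.filter_congr
  intro x _
  by_cases h : x ∈ b <;>
    simp [PySem.Set.contains, PySem.Set.mem_ofList, h]

lemma pv_inner (q : Int → Bool) (i : Int) (l : List Int) (r : List Int × List Int) :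
    l.foldl (fun r j => if q j then (r.1 ++ [i], r.2 ++ [j]) else r) r
      = (r.1 ++ (l.filter q).map (fun _ => i), r.2 ++ l.filter q) := by
  induction l generalizing r with
  | nil => simp
  | cons x t ih => by_cases h : q x <;> simp [h, ih]

lemma pv_outer {α : Type} (g1 g2 : α → List Int) (L : List α) (r : List Int × List Int) :
    L.foldl (fun r p => (r.1 ++ g1 p, r.2 ++ g2 p)) r
      = (r.1 ++ L.flatMap g1, r.2 ++ L.flatMap g2) := by
  induction L generalizing r with
  | nil => simp
  | cons x t ih => simp [ih]

lemma pv_addBond_getD (bs : List Int) (d : PySem.Dict Int (List Int)) (i a : Int) :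
    (fbAddBond d i bs).getD a [] = d.getD a [] ++ List.replicate (bs.count a) i := by
  induction bs generalizing d with
  | nil => simp [fbAddBond]
  | cons b t ih =>
    show (fbAddBond (d.modify b [] (fun l => l ++ [i])) i t).getD a []
        = d.getD a [] ++ List.replicate ((b :: t).count a) i
    rw [ih]
    by_cases h : b = a
    · subst h
      rw [PySem.Dict.getD_modify_self]
      simp [List.replicate_succ, List.append_assoc]
    · rw [PySem.Dict.getD_modify_of_ne d [] _ (fun he => h he.symm)]
      simp [h]

lemma pv_atomIndex_fold_getD (l : List (List Int)) (s0 : Int)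
    (d : PySem.Dict Int (List Int)) (a : Int) :
    ((PySem.List.enumerate l s0).foldl (fun d p => fbAddBond d p.1 p.2) d).getD a []
      = d.getD a [] ++ (PySem.List.enumerate l s0).flatMap
          (fun p => List.replicate (p.2.count a) p.1) := by
  induction l generalizing s0 d with
  | nil => simp [PySem.List.enumerate_nil]
  | cons x t ih =>
    rw [PySem.List.enumerate_cons]
    simp only [List.foldl_cons, List.flatMap_cons]
    rw [ih, pv_addBond_getD, List.append_assoc]

lemma pv_bucket (sets : List (List Int)) (a x : Int) :
    x ∈ (fbAtomIndex sets).getD a []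
      ↔ 0 ≤ x ∧ x < (sets.length : Int) ∧ a ∈ PySem.List.pyGetD sets x [] := by
  unfold fbAtomIndex
  rw [pv_atomIndex_fold_getD]
  simp only [PySem.Dict.getD_empty, List.nil_append, List.mem_flatMap]
  constructor
  · rintro ⟨p, hp, hx⟩
    rw [PySem.List.mem_enumerate_iff] at hp
    obtain ⟨k, hk, rfl⟩ := hp
    rw [List.mem_replicate] at hx
    obtain ⟨hc, rfl⟩ := hx
    simp only [zero_add]
    refine ⟨by positivity, by exact_mod_cast hk, ?_⟩
    rw [PySem.List.pyGetD_natCast sets k [], List.getD_eq_getElem _ _ hk]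
    have hc' : sets[k].count a ≠ 0 := by simpa using hc
    exact List.count_pos_iff.mp (Nat.pos_of_ne_zero hc')
  · rintro ⟨h0, hn, ha⟩
    obtain ⟨k, rfl⟩ := Int.eq_ofNat_of_zero_le h0
    have hk : k < sets.length := by exact_mod_cast hn
    refine ⟨((k : Int), sets[k]), ?_, ?_⟩
    · rw [PySem.List.mem_enumerate_iff]
      exact ⟨k, hk, by simp⟩
    · rw [PySem.List.pyGetD_natCast sets k [], List.getD_eq_getElem _ _ hk] at ha
      rw [List.mem_replicate]
      exact ⟨by simpa using (List.count_pos_iff.mpr ha).ne', rfl⟩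

lemma pv_cand_mem (a2b : PySem.Dict Int (List Int)) (s : List Int) (x : Int) :
    x ∈ fbCand a2b s ↔ ∃ a ∈ s, x ∈ a2b.getD a [] := by
  unfold fbCand
  suffices h : ∀ c0 : PySem.Set Int,
      x ∈ s.foldl (fun c a => PySem.Set.update c (a2b.getD a [])) c0
        ↔ x ∈ c0 ∨ ∃ a ∈ s, x ∈ a2b.getD a [] by
    simpa using h PySem.Set.empty
  induction s with
  | nil => simp
  | cons b t ih =>
    intro c0
    simp only [List.foldl_cons, ih, PySem.Set.mem_update, List.mem_cons]
    aesop

lemma pv_cand_nodup (a2b : PySem.Dict Int (List Int)) (s : List Int) :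
    (fbCand a2b s).Nodup := by
  unfold fbCand
  suffices h : ∀ c0 : PySem.Set Int, c0.Nodup →
      (s.foldl (fun c a => PySem.Set.update c (a2b.getD a [])) c0).Nodup by
    exact h PySem.Set.empty (by simp [PySem.Set.empty])
  induction s with
  | nil => exact fun c0 h => h
  | cons b t ih =>
    intro c0 h
    exact ih _ (PySem.Set.nodup_update _ _ h)

lemma pv_len_one_nonempty (l : List Int) (h : (PySem.Set.len l == 1) = true) : ∃ a, a ∈ l := by
  have : l.length = 1 := by
    simp only [PySem.Set.len, beq_iff_eq] at h
    exact_mod_cast h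
  cases l with
  | nil => simp at this
  | cons a t => exact ⟨a, List.mem_cons_self⟩

-- per-row core: sorted(filter(cand)) equals the filtered range
lemma pv_row (sets : List (List Int)) (s : List Int) :
    PySem.List.sorted
        (List.filter (fun j => (PySem.Set.inter s (PySem.List.pyGetD sets j [])).len == 1)
          (fbCand (fbAtomIndex sets) s)) (fun x => x) false
      = (PySem.List.pyRange 0 (sets.length : Int) 1).filter (pvQ sets s) := by
  apply PySem.List.sorted_eq_of_perm_of_pairwise_lt
  · -- permutation: both nodup, same members
    rw [List.perm_ext_iff_of_nodup]
    · intro x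
      simp only [List.mem_filter, PySem.List.mem_pyRange_one, pvQ]
      constructor
      · rintro ⟨⟨h0, hn⟩, hq⟩
        refine ⟨?_, hq⟩
        obtain ⟨a, ha⟩ := pv_len_one_nonempty _ hq
        unfold PySem.Set.inter at ha
        rw [List.mem_filter] at ha
        obtain ⟨has, hat⟩ := ha
        rw [pv_cand_mem]
        refine ⟨a, has, ?_⟩
        rw [pv_bucket]
        exact ⟨h0, hn, by simpa [PySem.Set.contains, List.contains_iff_mem] using hat⟩
      · rintro ⟨hc, hq⟩
        refine ⟨?_, hq⟩
        rw [pv_cand_mem] at hc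
        obtain ⟨a, _, hb⟩ := hc
        rw [pv_bucket] at hb
        exact ⟨hb.1, hb.2.1⟩
    · exact (List.Pairwise.filter _ (PySem.List.pairwise_lt_pyRange_one 0 (sets.length : Int))).imp
        (fun h => ne_of_lt h)
    · exact List.Nodup.filter _ (pv_cand_nodup _ _)
  · exact List.Pairwise.filter _ (PySem.List.pairwise_lt_pyRange_one 0 (sets.length : Int))

lemma pv_rowA (idx : List (List Int)) (i : Int) :
    List.filter
        (fun j => ((PySem.Set.ofList (PySem.List.pyGetD idx i [])).inter
          (PySem.List.pyGetD idx j [])).len == 1)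
        (PySem.List.pyRange 0 (idx.length : Int) 1)
      = List.filter
          (pvQ (idx.map fun b => PySem.Set.ofList b)
            (PySem.List.pyGetD (idx.map fun b => PySem.Set.ofList b) i []))
          (PySem.List.pyRange 0 (((idx.map fun b => PySem.Set.ofList b).length : Nat) : Int) 1) := by
  have hs : PySem.List.pyGetD (idx.map fun b => PySem.Set.ofList b) i []
      = PySem.Set.ofList (PySem.List.pyGetD idx i []) :=
    PySem.List.pyGetD_map (fun b => PySem.Set.ofList b) idx i []
  have hpred : ∀ j : Int,
      pvQ (idx.map fun b => PySem.Set.ofList b)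
          (PySem.List.pyGetD (idx.map fun b => PySem.Set.ofList b) i []) j
        = (((PySem.Set.ofList (PySem.List.pyGetD idx i [])).inter
            (PySem.List.pyGetD idx j [])).len == 1) := by
    intro j
    have ht : PySem.List.pyGetD (idx.map fun b => PySem.Set.ofList b) j []
        = PySem.Set.ofList (PySem.List.pyGetD idx j []) :=
      PySem.List.pyGetD_map (fun b => PySem.Set.ofList b) idx j []
    unfold pvQ
    rw [hs, ht, pv_inter_ofList]
  rw [List.length_map]
  exact (List.filter_congr (fun j _ => hpred j)).symm

lemma pv_main (idx : List (List Int)) :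
    get_bond_pair_fbond_graph idx = get_bond_pair_fbond_graph_alt idx := by
  by_cases h2 : idx.length = 2
  · -- the two-bond special case
    obtain ⟨x, y, rfl⟩ := List.length_eq_two.mp h2
    have hr : PySem.List.pyRange 0 2 1 = [0, 1] := by decide
    by_cases hxy : x = y
    · simp [get_bond_pair_fbond_graph, get_bond_pair_fbond_graph_alt, PySem.List.len, hr,
        List.foldl_cons, PySem.List.pyGetD, hxy]
    · have hyx : ¬ y = x := fun h => hxy h.symm
      simp [get_bond_pair_fbond_graph, get_bond_pair_fbond_graph_alt, PySem.List.len, hr,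
        List.foldl_cons, PySem.List.pyGetD, hxy, hyx]
  · -- the general case
    have hne : ((idx.length : Int) == 2) = false := by
      simp only [beq_eq_false_iff_ne, ne_eq]
      exact_mod_cast h2
    unfold get_bond_pair_fbond_graph get_bond_pair_fbond_graph_alt
    simp only [PySem.List.len, hne, if_false, Bool.false_eq_true]
    simp only [pv_inner, pv_outer, List.nil_append]
    rw [PySem.List.enumerate_eq_map_pyRange (idx.map fun b => PySem.Set.ofList b) ([] : List Int)]
    simp only [List.flatMap_map, PySem.List.len, List.length_map]
    congr 1
    · apply List.flatMap_congr
      intro i _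
      rw [pv_rowA idx i, ← pv_row, List.map_const']
    · congr 1
      apply List.flatMap_congr
      intro i _
      rw [pv_rowA idx i, ← pv_row]

-- ===== VERDICT (by name: the statement is the Claim_ definition above) =====
theorem get_bond_pair_fbond_graph_spec : Claim_equal_get_bond_pair_fbond_graph := by
  intro idx _
  show _ = _
  exact pv_main idx
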